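-- pv_equiv track=rewrite | github.com/NaturalAntibody/riot_na | riot_na/schemes/scheme_alignment.py | _fix_imgt_cdr_numbering
-- ===== SOURCE A (Python) =====
-- IntermediateNumbering = dict[int, list[tuple[str, int]]]
--
-- def _fix_imgt_cdr_numbering(
--     numbering: IntermediateNumbering,
--     insertion_position: int,
--     swap_priority: bool = False,
-- ) -> IntermediateNumbering:
--     insertions = numbering.get(insertion_position, [])
--     if len(insertions) <= 1:
--         return numbering
--
--     new_insertions = numbering.get(insertion_position + 1, [])
--     assert len(new_insertions) == 1
--
--     new_insertion_counter = 1
--     while True: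
--         len_diff = len(new_insertions) - len(insertions) if swap_priority else len(insertions) - len(new_insertions)
--         if len_diff in [0, 1]:
--             break
--         residue, _ = insertions.pop()
--         new_insertions.append((residue, new_insertion_counter))
--         new_insertion_counter += 1
--
--     numbering[insertion_position] = insertions
--     numbering[insertion_position + 1] = new_insertions
--     return numbering
-- ===== SOURCE B (Python) =====
-- def _fix_imgt_cdr_numbering(numbering, insertion_position, swap_priority=False):
--     insertions = numbering.get(insertion_position, [])
--     if len(insertions) <= 1:
--         return numbering
--
--     new_insertions = numbering.get(insertion_position + 1, [])
--     assert len(new_insertions) == 1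
--
--     n = len(insertions)
--     k = n // 2 if swap_priority else (n - 1) // 2
--     new_insertions.extend((res, i + 1) for i, (res, _) in enumerate(reversed(insertions[n - k:])))
--     del insertions[n - k:]
--
--     numbering[insertion_position] = insertions
--     numbering[insertion_position + 1] = new_insertions
--     return numbering
-- ===== Notes on version B (the rewrite author's own statement) =====
-- stated objective: simpler
-- what changed: A's while-True loop that pops one residue at a time and recomputes the length difference each iteration is replaced by a closed-form count k of residues to move (n//2 or (n-1)//2), one slice deletion and one enumerate pass building the moved entries.
import Mathlib
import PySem

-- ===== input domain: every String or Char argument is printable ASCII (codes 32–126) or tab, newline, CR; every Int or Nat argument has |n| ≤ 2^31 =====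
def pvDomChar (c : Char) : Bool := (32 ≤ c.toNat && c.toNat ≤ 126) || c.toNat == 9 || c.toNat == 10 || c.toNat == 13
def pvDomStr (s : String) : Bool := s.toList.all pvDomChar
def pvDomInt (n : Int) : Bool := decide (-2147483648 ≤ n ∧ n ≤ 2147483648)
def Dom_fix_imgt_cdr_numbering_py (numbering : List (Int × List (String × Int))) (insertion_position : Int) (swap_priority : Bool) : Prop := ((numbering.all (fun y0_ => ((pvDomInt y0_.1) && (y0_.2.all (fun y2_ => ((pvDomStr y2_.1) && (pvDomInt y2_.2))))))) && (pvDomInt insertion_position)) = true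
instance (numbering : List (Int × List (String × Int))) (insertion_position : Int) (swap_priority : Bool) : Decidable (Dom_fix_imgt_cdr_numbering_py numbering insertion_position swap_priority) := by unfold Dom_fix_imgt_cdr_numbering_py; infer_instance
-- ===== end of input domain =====

-- B replaces A's while-loop (which pops one residue at a time, recomputing the length difference)
-- by a closed-form count of residues to move, one slice and one enumerate pass (objective: simpler).
-- Both A and B mutate the dict's lists in place in Python; the equivalence proved here is about the
-- returned dict (which is the same object), modelled as an insertion-ordered association list.

-- ===== PORT A =====
-- the `while True` loop of A: pops the last insertion, appends it to new_insertions with a running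
-- counter, until len_diff ∈ {0, 1}.  A failing pop (empty list) is Python's IndexError — unreachable
-- under Pre_; the port stops there.
def pvLoopA (swap : Bool) (ins newi : List (String × Int)) (c : Int) :
    List (String × Int) × List (String × Int) :=
  let len_diff : Int :=
    if swap then (newi.length : Int) - (ins.length : Int)
    else (ins.length : Int) - (newi.length : Int)
  if len_diff = 0 ∨ len_diff = 1 then (ins, newi)
  else
    match h : PySem.List.pop? ins with
    | none => (ins, newi)
    | some (rv, rest) => pvLoopA swap rest (newi ++ [(rv.1, c)]) (c + 1)
termination_by ins.length
decreasing_by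
  have := PySem.List.length_of_pop?_eq_some ins h; simp_all; omega

def fix_imgt_cdr_numbering_py (numbering : List (Int × List (String × Int))) (insertion_position : Int) (swap_priority : Bool) : List (Int × List (String × Int)) :=
  let d := PySem.Dict.ofList numbering
  let insertions := d.getD insertion_position []
  if insertions.length ≤ 1 then d.items
  else
    let new_insertions := d.getD (insertion_position + 1) []
    if new_insertions.length = 1 then
      let r := pvLoopA swap_priority insertions new_insertions 1
      ((d.insert insertion_position r.1).insert (insertion_position + 1) r.2).items
    else d.items  -- assert fails: Python raises AssertionError; excluded by Pre_

-- ===== PORT B =====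
def fix_imgt_cdr_numbering_py_alt (numbering : List (Int × List (String × Int))) (insertion_position : Int) (swap_priority : Bool) : List (Int × List (String × Int)) :=
  let d := PySem.Dict.ofList numbering
  let insertions := d.getD insertion_position []
  if insertions.length ≤ 1 then d.items
  else
    let new_insertions := d.getD (insertion_position + 1) []
    if new_insertions.length = 1 then
      let n : Int := insertions.length
      let k : Int := if swap_priority then PySem.Int.floordiv n 2 else PySem.Int.floordiv (n - 1) 2
      let moved := (PySem.List.enumerate (PySem.List.slice insertions (some (n - k)) none).reverse).map
        (fun p => (p.2.1, p.1 + 1))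
      let new' := new_insertions ++ moved
      let ins' := PySem.List.slice insertions none (some (n - k))
      ((d.insert insertion_position ins').insert (insertion_position + 1) new').items
    else d.items  -- assert fails: Python raises AssertionError; excluded by Pre_

-- ===== PRECONDITION & SPEC =====
-- Pre_ excludes exactly the inputs on which Python A raises AssertionError: more than one insertion
-- at insertion_position while the entry at insertion_position + 1 does not hold exactly one element.
def Pre_fix_imgt_cdr_numbering_py (numbering : List (Int × List (String × Int))) (insertion_position : Int) (swap_priority : Bool) : Prop :=
  ((PySem.Dict.ofList numbering).getD insertion_position []).length ≤ 1 ∨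
  ((PySem.Dict.ofList numbering).getD (insertion_position + 1) []).length = 1
instance (numbering : List (Int × List (String × Int))) (insertion_position : Int) (swap_priority : Bool) : Decidable (Pre_fix_imgt_cdr_numbering_py numbering insertion_position swap_priority) := by unfold Pre_fix_imgt_cdr_numbering_py; infer_instance

def pvWitness_fix_imgt_cdr_numbering_py : (List (Int × List (String × Int))) × Int × Bool :=
  ([(2, [("A", 0), ("B", 0), ("C", 0)]), (3, [("D", 0)])], 2, false)

def Spec_fix_imgt_cdr_numbering_py (numbering : List (Int × List (String × Int))) (insertion_position : Int) (swap_priority : Bool) (out : List (Int × List (String × Int))) : Prop := out = fix_imgt_cdr_numbering_py_alt numbering insertion_position swap_priority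
instance (numbering : List (Int × List (String × Int))) (insertion_position : Int) (swap_priority : Bool) (out : List (Int × List (String × Int))) : Decidable (Spec_fix_imgt_cdr_numbering_py numbering insertion_position swap_priority out) := by unfold Spec_fix_imgt_cdr_numbering_py; infer_instance

-- ===== CLAIM (what is proved, stated in full; the proofs are below) =====
def Claim_equal_fix_imgt_cdr_numbering_py : Prop := ∀ (numbering : List (Int × List (String × Int))) (insertion_position : Int) (swap_priority : Bool), Dom_fix_imgt_cdr_numbering_py numbering insertion_position swap_priority → Pre_fix_imgt_cdr_numbering_py numbering insertion_position swap_priority → Spec_fix_imgt_cdr_numbering_py numbering insertion_position swap_priority (fix_imgt_cdr_numbering_py numbering insertion_position swap_priority)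

-- ===== LEMMAS AND PROOFS =====

-- the residues A's loop moves: last k elements of ins, tail first, paired with counters c, c+1, …
def pvMoved : List (String × Int) → Int → Nat → List (String × Int)
  | _, _, 0 => []
  | ins, c, Nat.succ k =>
    match ins.getLast? with
    | none => []
    | some rv => (rv.1, c) :: pvMoved ins.dropLast (c + 1) k

def pvGo : List (String × Int) → Int → List (String × Int)
  | [], _ => []
  | rv :: t, c => (rv.1, c) :: pvGo t (c + 1)

theorem pvLoopA_closed (swap : Bool) : ∀ (k : Nat) (ins newi : List (String × Int)) (c : Int),
    (if swap then ins.length = newi.length + 2 * k ∨ ins.length + 1 = newi.length + 2 * k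
     else ins.length = newi.length + 2 * k ∨ ins.length = newi.length + 2 * k + 1) →
    pvLoopA swap ins newi c = (ins.take (ins.length - k), newi ++ pvMoved ins c k) := by
  intro k
  induction k with
  | zero =>
    intro ins newi c h
    rw [pvLoopA]
    have hc : (if swap then (newi.length : Int) - (ins.length : Int)
        else (ins.length : Int) - (newi.length : Int)) = 0 ∨
        (if swap then (newi.length : Int) - (ins.length : Int)
        else (ins.length : Int) - (newi.length : Int)) = 1 := by
      cases swap <;> simp only [Bool.false_eq_true, if_true, if_false] at h ⊢ <;> omega
    simp only [hc, if_true, pvMoved, List.append_nil, List.take_length, Nat.sub_zero]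
  | succ k ih =>
    intro ins newi c h
    have hlen : (if swap then ins.length = newi.length + 2 * (k + 1) ∨
        ins.length + 1 = newi.length + 2 * (k + 1)
        else ins.length = newi.length + 2 * (k + 1) ∨
        ins.length = newi.length + 2 * (k + 1) + 1) := h
    have hne : ins ≠ [] := by
      intro hnil; subst hnil
      cases swap <;> simp only [Bool.false_eq_true, reduceIte, List.length_nil] at hlen <;> omega
    obtain ⟨ys, x, hx⟩ := List.eq_nil_or_concat ins |>.resolve_left hne
    rw [List.concat_eq_append] at hx
    subst hx
    have hy : (ys ++ [x]).length = ys.length + 1 := by simp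
    rw [pvLoopA]
    have hc : ¬ ((if swap then ((newi.length : Int)) - (((ys ++ [x]).length : Nat) : Int)
        else (((ys ++ [x]).length : Nat) : Int) - (newi.length : Int)) = 0 ∨
        (if swap then ((newi.length : Int)) - (((ys ++ [x]).length : Nat) : Int)
        else (((ys ++ [x]).length : Nat) : Int) - (newi.length : Int)) = 1) := by
      rw [hy]
      cases swap <;> simp only [Bool.false_eq_true, reduceIte, hy] at hlen ⊢ <;> push_cast <;> omega
    simp only [hc, if_false]
    split
    · next heq => rw [PySem.List.pop?_last] at heq; exact absurd heq (by simp)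
    next rv rest heq =>
    rw [PySem.List.pop?_last] at heq
    obtain ⟨rfl, rfl⟩ : x = rv ∧ ys = rest := by simpa [Prod.ext_iff] using heq
    rw [ih ys (newi ++ [(x.1, c)]) (c + 1) (by
      cases swap <;> simp only [Bool.false_eq_true, reduceIte, hy, List.length_append,
        List.length_singleton] at hlen ⊢ <;> omega)]
    have hmoved : pvMoved (ys ++ [x]) c (k + 1) = (x.1, c) :: pvMoved ys (c + 1) k := by
      show (match (ys ++ [x]).getLast? with
        | none => []
        | some z => (z.1, c) :: pvMoved (ys ++ [x]).dropLast (c + 1) k) = _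
      rw [List.getLast?_concat, List.dropLast_concat]
    simp [hmoved]

theorem pvMoved_eq_go : ∀ (k : Nat) (ins : List (String × Int)) (c : Int),
    pvMoved ins c k = pvGo (ins.reverse.take k) c := by
  intro k
  induction k with
  | zero => intro ins c; simp [pvMoved, pvGo]
  | succ k ih =>
    intro ins c
    rcases List.eq_nil_or_concat ins with rfl | ⟨ys, x, hx⟩
    · simp [pvMoved, pvGo]
    · rw [List.concat_eq_append] at hx
      subst hx
      have hmoved : pvMoved (ys ++ [x]) c (k + 1) = (x.1, c) :: pvMoved ys (c + 1) k := by
        show (match (ys ++ [x]).getLast? with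
          | none => []
          | some rv => (rv.1, c) :: pvMoved (ys ++ [x]).dropLast (c + 1) k) = _
        rw [List.getLast?_concat, List.dropLast_concat]
      rw [hmoved, ih]
      simp [pvGo]

theorem pvEnum_map_eq_go : ∀ (l : List (String × Int)) (c : Int),
    (PySem.List.enumerate l c).map (fun p => (p.2.1, p.1 + 1)) = pvGo l (c + 1) := by
  intro l
  induction l with
  | nil => intro c; simp [PySem.List.enumerate, pvGo]
  | cons x t ih =>
    intro c
    rw [PySem.List.enumerate_cons]
    simp only [List.map_cons, pvGo]
    rw [ih]

-- B's moved/ins' expressions equal A's closed forms, for ins.length ≥ 2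
theorem alt_pieces (swap : Bool) (ins : List (String × Int)) (h2 : 2 ≤ ins.length) :
    (PySem.List.slice ins none (some ((ins.length : Int) -
        (if swap then PySem.Int.floordiv (ins.length : Int) 2
         else PySem.Int.floordiv ((ins.length : Int) - 1) 2))) =
      ins.take (ins.length - (if swap then ins.length / 2 else (ins.length - 1) / 2))) ∧
    ((PySem.List.enumerate (PySem.List.slice ins (some ((ins.length : Int) -
        (if swap then PySem.Int.floordiv (ins.length : Int) 2
         else PySem.Int.floordiv ((ins.length : Int) - 1) 2))) none).reverse).map
        (fun p => (p.2.1, p.1 + 1)) =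
      pvMoved ins 1 (if swap then ins.length / 2 else (ins.length - 1) / 2)) := by
  set n : Nat := ins.length with hn
  set k : Nat := (if swap then n / 2 else (n - 1) / 2) with hk
  have hkI : (if swap then PySem.Int.floordiv (n : Int) 2
      else PySem.Int.floordiv ((n : Int) - 1) 2) = (k : Int) := by
    cases swap
    · have h1 : ((n : Int) - 1) = ((n - 1 : Nat) : Int) := by omega
      rw [hk, if_neg (by simp), h1]
      exact_mod_cast PySem.Int.floordiv_natCast (n - 1) 2
    · rw [hk, if_pos rfl]
      exact_mod_cast PySem.Int.floordiv_natCast n 2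
  have hnk : ((n : Int) - (if swap then PySem.Int.floordiv (n : Int) 2
      else PySem.Int.floordiv ((n : Int) - 1) 2)) = ((n - k : Nat) : Int) := by
    rw [hkI]
    have : k ≤ n := by rw [hk]; cases swap <;> simp <;> omega
    omega
  constructor
  · rw [hnk, PySem.List.slice_to_natCast]
  · rw [hnk, PySem.List.slice_from_natCast]
    have hrev : (ins.drop (n - k)).reverse = ins.reverse.take k := by
      rw [List.take_reverse, ← hn]
    rw [hrev]
    have := pvEnum_map_eq_go (ins.reverse.take k) 0
    rw [this, pvMoved_eq_go]
    norm_num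

-- ===== VERDICT (by name: the statement is the Claim_ definition above) =====
theorem fix_imgt_cdr_numbering_py_spec : Claim_equal_fix_imgt_cdr_numbering_py := by
  intro numbering pos swap _hDom hPre
  unfold Spec_fix_imgt_cdr_numbering_py
  unfold Pre_fix_imgt_cdr_numbering_py at hPre
  simp only [fix_imgt_cdr_numbering_py, fix_imgt_cdr_numbering_py_alt]
  set d := PySem.Dict.ofList numbering with hd
  set ins := d.getD pos [] with hins
  set newi := d.getD (pos + 1) [] with hnewi
  by_cases hle : ins.length ≤ 1
  · simp [hle]
  · have h1 : newi.length = 1 := hPre.resolve_left hle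
    have h2 : 2 ≤ ins.length := by omega
    simp only [hle, if_false, h1, if_true]
    set k : Nat := (if swap then ins.length / 2 else (ins.length - 1) / 2) with hk
    have hloop := pvLoopA_closed swap k ins newi 1 (by
      cases swap <;> simp only [hk, if_true, if_false, Bool.false_eq_true] <;> omega)
    obtain ⟨hslice, henum⟩ := alt_pieces swap ins h2
    rw [hloop]
    rw [hslice, henum]

theorem fix_imgt_cdr_numbering_py_pre_witness :
    Dom_fix_imgt_cdr_numbering_py (pvWitness_fix_imgt_cdr_numbering_py.1) (pvWitness_fix_imgt_cdr_numbering_py.2.1) (pvWitness_fix_imgt_cdr_numbering_py.2.2) ∧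
    Pre_fix_imgt_cdr_numbering_py (pvWitness_fix_imgt_cdr_numbering_py.1) (pvWitness_fix_imgt_cdr_numbering_py.2.1) (pvWitness_fix_imgt_cdr_numbering_py.2.2) := by
  constructor <;> decide
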